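-- pv_equiv track=rewrite | github.com/AlexHorch/AoC_Python | 2015/Day19/solution.py | applications
-- ===== SOURCE A (Python) =====
-- def applications(mm, subs):
--     x = []
--     for k, v in subs.items():
--         idx = 0
--         while k in mm[idx:]:
--             i = mm.index(k, idx)
--             for s in v:
--                 x.append(mm[:i] + s + mm[i+len(k):])
--             idx = i+1
--     return set(x)
-- ===== SOURCE B (Python) =====
-- def applications(mm, subs):
--     # Single position-major pass: walk every start position once, matching all
--     # keys there, and collect each key's variants into its own bucket; then
--     # concatenate the buckets in key order and deduplicate.
--     items = list(subs.items())
--     buckets = [[] for _ in items]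
--     for i in range(len(mm) + 1):
--         buckets = [b + [mm[:i] + s + mm[i + len(k):] for s in v]
--                    if mm.startswith(k, i) else b
--                    for b, (k, v) in zip(buckets, items)]
--     out = []
--     for b in buckets:
--         out.extend(b)
--     return set(out)
-- ===== Notes on version B (the rewrite author's own statement) =====
-- stated objective: alternative
-- what changed: B inverts the loop nesting: instead of A's key-major while-loop that repeatedly rescans mm with 'in'/mm.index per key, B makes ONE position-major pass over all start positions, matching every key at each position into a per-key bucket list, and finally concatenates the buckets in key order and deduplicates.
-- outside the precondition, e.g. on applications('a', {'': ['x']}): A raises ValueError, B returns {'ax', 'xa'}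
-- crash fix: A raises ValueError whenever some substitution key is the empty string (mm.index('', idx) once idx passes the end of mm); B returns the set of variants obtained by inserting each replacement at every position. — e.g. on applications("a", [("", ["x"])]): A raises ValueError, B returns ["xa", "ax"]
import Mathlib
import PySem

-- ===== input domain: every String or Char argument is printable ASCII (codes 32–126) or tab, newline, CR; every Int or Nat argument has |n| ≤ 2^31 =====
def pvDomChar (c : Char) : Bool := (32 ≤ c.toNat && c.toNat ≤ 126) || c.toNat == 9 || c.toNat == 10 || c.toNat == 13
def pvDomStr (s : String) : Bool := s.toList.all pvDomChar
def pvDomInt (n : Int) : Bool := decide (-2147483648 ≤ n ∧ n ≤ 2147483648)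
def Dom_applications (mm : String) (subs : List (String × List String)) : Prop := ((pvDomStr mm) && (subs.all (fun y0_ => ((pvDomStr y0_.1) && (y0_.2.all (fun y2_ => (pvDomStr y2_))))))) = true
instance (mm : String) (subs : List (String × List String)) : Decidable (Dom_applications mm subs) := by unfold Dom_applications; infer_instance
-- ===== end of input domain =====

-- B inverts A's loop nesting: one position-major pass over all start positions, matching every
-- key at each position into a per-key bucket, then the buckets are concatenated and deduplicated.

-- ===== PORT A =====
-- the 'while k in mm[idx:]' loop; fuel = len(mm)+1 bounds the iterations (idx strictly grows, and an
-- occurrence needs idx ≤ len(mm) since Pre_ keeps every key nonempty)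
def applicationsWhile (mm k : List Char) (v : List String) (fuel : Nat) (idx : Int) (x : List String) : List String :=
  match fuel with
  | 0 => x
  | fuel + 1 =>
    if PySem.Chars.isIn k (PySem.List.slice mm (some idx) none) then      -- while k in mm[idx:]
      let i := PySem.Chars.findFrom mm k idx                              -- i = mm.index(k, idx)
      applicationsWhile mm k v fuel (i + 1)                               -- idx = i + 1
        (v.foldl (fun x s => x ++                                         -- for s in v: x.append(mm[:i] + s + mm[i+len(k):])
          [String.ofList (PySem.List.slice mm none (some i) ++ s.toList ++ PySem.List.slice mm (some (i + (k.length : Int))) none)]) x)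
    else x

def applications (mm : String) (subs : List (String × List String)) : List String :=
  PySem.Set.ofList
    (subs.foldl (fun x kv => applicationsWhile mm.toList kv.1.toList kv.2 (mm.toList.length + 1) 0 x) [])

-- ===== PORT B =====
-- buckets = [b + [mm[:i]+s+mm[i+len(k):] for s in v] if mm.startswith(k, i) else b
--            for b, (k, v) in zip(buckets, items)]
-- mm.startswith(k, i) with 0 ≤ i is exactly the prefix test Chars.startswith on mm[i:] = drop i.toNat
def altStep (mm : List Char) (items : List (String × List String)) (buckets : List (List String)) (i : Int) : List (List String) :=
  (buckets.zip items).map (fun bkv =>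
    if PySem.Chars.startswith (List.drop i.toNat mm) bkv.2.1.toList then
      bkv.1 ++ bkv.2.2.map (fun s => String.ofList
        (PySem.List.slice mm none (some i) ++ s.toList ++ PySem.List.slice mm (some (i + (bkv.2.1.toList.length : Int))) none))
    else bkv.1)

def applications_alt (mm : String) (subs : List (String × List String)) : List String :=
  -- buckets = [[] for _ in items]; for i in range(len(mm)+1): buckets = [...];
  -- out = []; for b in buckets: out.extend(b); return set(out)
  PySem.Set.ofList
    (((PySem.List.pyRange 0 ((mm.toList.length : Int) + 1) 1).foldl
        (altStep mm.toList subs) (subs.map (fun _ => []))).foldl (fun out b => out ++ b) [])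

-- ===== PRECONDITION & SPEC =====
-- Pre_ excludes only an empty key, on which the Python A raises ValueError
-- (mm.index('', idx) once idx passes the end of mm).
def Pre_applications (mm : String) (subs : List (String × List String)) : Prop :=
  ∀ kv ∈ subs, kv.1 ≠ ""
instance (mm : String) (subs : List (String × List String)) : Decidable (Pre_applications mm subs) := by unfold Pre_applications; infer_instance

def pvWitness_applications : String × (List (String × List String)) := ("abab", [("ab", ["X", "Y"])])

-- A raises ValueError whenever some substitution key is the empty string; B returns the set of
-- variants obtained by inserting each replacement string at every position of mm.
def Raises_applications (mm : String) (subs : List (String × List String)) : Prop :=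
  ∃ kv ∈ subs, kv.1 = ""
instance (mm : String) (subs : List (String × List String)) : Decidable (Raises_applications mm subs) := by unfold Raises_applications; infer_instance
def pvRaiseWitness_applications : String × (List (String × List String)) := ("a", [("", ["x"])])
def pvRaiseWitnessOut_applications : List String := ["xa", "ax"]

def Spec_applications (mm : String) (subs : List (String × List String)) (out : List String) : Prop := out = applications_alt mm subs
instance (mm : String) (subs : List (String × List String)) (out : List String) : Decidable (Spec_applications mm subs out) := by unfold Spec_applications; infer_instance

-- ===== CLAIM (what is proved, stated in full; the proofs are below) =====
def Claim_equal_applications : Prop := ∀ (mm : String) (subs : List (String × List String)), Dom_applications mm subs → Pre_applications mm subs → Spec_applications mm subs (applications mm subs)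
def Claim_raises_applications : Prop := (∀ (mm : String) (subs : List (String × List String)), Dom_applications mm subs → Raises_applications mm subs → ¬ Pre_applications mm subs) ∧ (Dom_applications (pvRaiseWitness_applications.1) (pvRaiseWitness_applications.2) ∧ Raises_applications (pvRaiseWitness_applications.1) (pvRaiseWitness_applications.2) ∧ applications_alt (pvRaiseWitness_applications.1) (pvRaiseWitness_applications.2) = pvRaiseWitnessOut_applications)

-- ===== LEMMAS AND PROOFS =====

-- one variant string  mm[:i] + s + mm[i+len(k):]
def mkVar (mm : List Char) (kLen : Nat) (s : String) (i : Int) : String :=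
  String.ofList (PySem.List.slice mm none (some i) ++ s.toList ++ PySem.List.slice mm (some (i + (kLen : Int))) none)

-- the occurrence positions of k in mm at or after idx, in increasing order
def occs (mm k : List Char) (idx : Nat) : List Nat :=
  (List.range' idx (mm.length + 1 - idx)).filter (fun j => PySem.Chars.startswith (List.drop j mm) k)

-- the block of variants one key contributes
def genKey (mm : List Char) (kv : String × List String) : List String :=
  (occs mm kv.1.toList 0).flatMap (fun (j : Nat) => kv.2.map (fun s => mkVar mm kv.1.toList.length s (j : Int)))

lemma occs_nil (mm k : List Char) (idx : Nat) (h : ¬ k <:+: List.drop idx mm) :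
    occs mm k idx = [] := by
  unfold occs
  rw [List.filter_eq_nil_iff]
  intro j hj hsw
  rcases List.mem_range'_1.mp hj with ⟨h1, _⟩
  have hpre : k <+: List.drop j mm := (PySem.Chars.startswith_iff _ _).mp hsw
  have hdd : List.drop j mm = List.drop (j - idx) (List.drop idx mm) := by
    rw [List.drop_drop]; congr 1; omega
  exact h ((hdd ▸ hpre).isInfix.trans (List.drop_suffix _ _).isInfix)

lemma occs_cons (mm k : List Char) (idx i : Nat) (hidx : idx ≤ i) (hiL : i ≤ mm.length)
    (hocc : k <+: List.drop i mm) (hmin : ∀ j, idx ≤ j → j < i → ¬ k <+: List.drop j mm) :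
    occs mm k idx = i :: occs mm k (i + 1) := by
  unfold occs
  have hsplit : mm.length + 1 - idx = (i - idx) + (mm.length + 1 - i) := by omega
  rw [hsplit, ← List.range'_append (s := idx) (m := i - idx) (n := mm.length + 1 - i) (step := 1)]
  have hi : idx + 1 * (i - idx) = i := by omega
  rw [hi, List.filter_append]
  have h1 : (List.range' idx (i - idx)).filter (fun j => PySem.Chars.startswith (List.drop j mm) k) = [] := by
    rw [List.filter_eq_nil_iff]
    intro j hj hsw
    rcases List.mem_range'_1.mp hj with ⟨ha, hb⟩
    exact hmin j ha (by omega) ((PySem.Chars.startswith_iff _ _).mp hsw)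
  have h2 : mm.length + 1 - i = (mm.length - i) + 1 := by omega
  rw [h1, h2, List.range'_succ, List.filter_cons]
  have h3 : mm.length + 1 - (i + 1) = mm.length - i := by omega
  simp [(PySem.Chars.startswith_iff _ _).mpr hocc, h3]

-- A's while loop collects, left to right, the variants at every occurrence position ≥ idx
lemma whileA_eq (mm k : List Char) (v : List String) (hk : k ≠ []) :
    ∀ (fuel idx : Nat) (x : List String), mm.length + 1 ≤ fuel + idx →
      applicationsWhile mm k v fuel ((idx : Nat) : Int) x
        = x ++ (occs mm k idx).flatMap (fun (j : Nat) => v.map (fun s => mkVar mm k.length s (j : Int))) := by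
  intro fuel
  induction fuel with
  | zero =>
      intro idx x hf
      have h0 : mm.length + 1 - idx = 0 := by omega
      simp [applicationsWhile, occs, h0]
  | succ fuel ih =>
      intro idx x hf
      simp only [applicationsWhile]
      rw [PySem.List.slice_from mm (a := ((idx : Nat) : Int)) (Int.natCast_nonneg idx), Int.toNat_natCast]
      cases hin : PySem.Chars.isIn k (List.drop idx mm) with
      | false =>
          rw [if_neg (by simp)]
          rw [occs_nil mm k idx ((PySem.Chars.isIn_eq_false_iff _ _).mp hin)]
          simp
      | true =>
          rw [if_pos rfl]
          have hinf : k <:+: List.drop idx mm := (PySem.Chars.isIn_iff_infix _ _).mp hin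
          have hidxL : idx ≤ mm.length := by
            by_contra hgt
            rw [List.drop_eq_nil_of_le (by omega)] at hinf
            exact hk (List.infix_nil.mp hinf)
          have hne : PySem.Chars.findFrom mm k ((idx : Nat) : Int) ≠ -1 := fun h =>
            ((PySem.Chars.findFrom_natCast_eq_neg_one_iff mm k idx hidxL).mp h) hinf
          obtain ⟨hge, hpre, hmin⟩ := PySem.Chars.findFrom_natCast_spec mm k idx hidxL hne
          set i : Int := PySem.Chars.findFrom mm k ((idx : Nat) : Int) with hidef
          have hge0 : 0 ≤ i := le_trans (Int.natCast_nonneg idx) hge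
          have hiN : i = ((i.toNat : Nat) : Int) := by omega
          have hidxi : idx ≤ i.toNat := by omega
          have hkpos : 0 < k.length := List.length_pos_of_ne_nil hk
          have hiL : i.toNat ≤ mm.length := by
            have h1 := hpre.length_le
            rw [List.length_drop] at h1
            omega
          rw [PySem.List.foldl_append_singleton_eq_map
            (f := fun s => String.ofList (PySem.List.slice mm none (some i) ++ s.toList
              ++ PySem.List.slice mm (some (i + (k.length : Int))) none)) v x]
          have hstep : i + 1 = (((i.toNat + 1 : Nat)) : Int) := by omega
          rw [hstep, ih (i.toNat + 1) _ (by omega)]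
          rw [occs_cons mm k idx i.toNat hidxi hiL hpre hmin]
          rw [List.flatMap_cons]
          simp only [mkVar, ← hiN, List.append_assoc]

-- A = set(x) where x is the concatenation of the per-key blocks
lemma applications_eq (mm : String) (subs : List (String × List String))
    (h : ∀ kv ∈ subs, kv.1 ≠ "") :
    applications mm subs = PySem.Set.ofList (subs.flatMap (genKey mm.toList)) := by
  unfold applications
  congr 1
  have hA : subs.foldl (fun x kv => applicationsWhile mm.toList kv.1.toList kv.2 (mm.toList.length + 1) 0 x) []
      = subs.foldl (fun x kv => x ++ genKey mm.toList kv) [] := by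
    refine PySem.List.foldl_congr_mem _ _ _ _ ?_
    intro acc kv hkv
    have hk : kv.1.toList ≠ [] := fun he => h kv hkv (String.toList_eq_nil_iff.mp he)
    have h0 : ((0 : Int)) = (((0 : Nat)) : Int) := by norm_num
    rw [h0, whileA_eq mm.toList kv.1.toList kv.2 hk (mm.toList.length + 1) 0 acc (by omega)]
    rfl
  rw [hA]
  exact PySem.List.foldl_append_eq_flatMap (genKey mm.toList) subs []

-- B SIDE ------------------------------------------------------------------

-- what one key contributes at one position (ite form of B's per-bucket update)
def contrib (mm : List Char) (kv : String × List String) (i : Int) : List String :=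
  if PySem.Chars.startswith (List.drop i.toNat mm) kv.1.toList then
    kv.2.map (fun s => mkVar mm kv.1.toList.length s i)
  else []

lemma zip_map_self {α β : Type} (f : α → β) (l : List α) :
    (l.map f).zip l = l.map (fun x => (f x, x)) := by
  induction l with
  | nil => rfl
  | cons a t ih => simp [ih]

-- the position fold maintains buckets = items.map g, appending each position's contribution
lemma fold_altStep (mm : List Char) (items : List (String × List String)) :
    ∀ (P : List Int) (g : (String × List String) → List String),
      P.foldl (altStep mm items) (items.map g)
        = items.map (fun kv => g kv ++ P.flatMap (contrib mm kv)) := by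
  intro P
  induction P with
  | nil => intro g; simp
  | cons i P ih =>
      intro g
      rw [List.foldl_cons]
      have hstep : altStep mm items (items.map g) i
          = items.map (fun kv => g kv ++ contrib mm kv i) := by
        unfold altStep
        rw [zip_map_self, List.map_map]
        refine List.map_congr_left ?_
        intro kv _
        simp only [Function.comp, contrib, mkVar]
        split_ifs <;> simp
      rw [hstep]
      have := ih (fun kv => g kv ++ contrib mm kv i)
      simp only [List.flatMap_cons, ← List.append_assoc] at *
      exact this

lemma flatMap_ite_filter {α β : Type} (p : α → Bool) (f : α → List β) (l : List α) :
    l.flatMap (fun x => if p x then f x else []) = (l.filter p).flatMap f := by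
  induction l with
  | nil => rfl
  | cons a t ih => by_cases h : p a <;> simp [h, ih]

-- B's per-key contribution over all positions is exactly A's per-key block
lemma contrib_eq_genKey (mm : List Char) (kv : String × List String) :
    (PySem.List.pyRange 0 ((mm.length : Int) + 1) 1).flatMap (contrib mm kv) = genKey mm kv := by
  have hcast : ((mm.length : Int) + 1) = (((mm.length + 1 : Nat)) : Int) := by push_cast; ring
  rw [hcast, PySem.List.pyRange_zero_natCast]
  unfold genKey occs
  rw [List.flatMap_map]
  have : (fun (j : Nat) => contrib mm kv (j : Int))
      = fun (j : Nat) => if PySem.Chars.startswith (List.drop j mm) kv.1.toList then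
          kv.2.map (fun s => mkVar mm kv.1.toList.length s (j : Int)) else [] := by
    funext j; simp [contrib]
  rw [this, flatMap_ite_filter, List.range_eq_range']
  simp

lemma applications_alt_eq (mm : String) (subs : List (String × List String)) :
    applications_alt mm subs = PySem.Set.ofList (subs.flatMap (genKey mm.toList)) := by
  unfold applications_alt
  rw [fold_altStep mm.toList subs _ (fun _ => [])]
  simp only [List.nil_append]
  congr 1
  rw [PySem.List.foldl_append_eq_flatMap (fun b => b) _ [], List.nil_append,
      List.flatMap_map]
  refine List.flatMap_congr ?_
  intro kv _
  exact contrib_eq_genKey mm.toList kv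

-- ===== VERDICT (by name: the statement is the Claim_ definition above) =====
theorem applications_spec : Claim_equal_applications := by
  intro mm subs _ hpre
  unfold Spec_applications
  rw [applications_eq mm subs hpre, applications_alt_eq mm subs]

@[simp] theorem applications_raises : Claim_raises_applications := by
  unfold Claim_raises_applications
  constructor
  · rintro mm subs _ ⟨kv, hkv, hke⟩ h1
    exact h1 kv hkv hke
  · exact ⟨by decide, by decide, by decide⟩
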